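-- pv_equiv track=rewrite | github.com/Surajk86808/Creative_Client | Leads/backend/lead_finder/scraper.py | _clean_emails
-- ===== SOURCE A (Python) =====
-- def _clean_emails(emails: set[str]) -> list[str]:
--     """Normalize and filter likely business emails."""
--     filtered = [
--         email
--         for email in sorted(email.strip().lower() for email in emails if email and "@" in email)
--         if "example.com" not in email
--         and "wixpress.com" not in email
--         and "noreply@" not in email
--         and "no-reply@" not in email
--     ]
--     deduped: list[str] = []
--     seen: set[str] = set()
--     for email in filtered:
--         if email in seen:
--             continue
--         seen.add(email)
--         deduped.append(email)
--     return deduped[:5]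
-- ===== SOURCE B (Python) =====
-- def _clean_emails(emails):
--     """Normalize and filter likely business emails."""
--     pool = [e.strip().lower() for e in emails if e and "@" in e]
--     return _pick(pool, None, 5)
--
--
-- def _pick(pool, last, k):
--     """Select the k smallest distinct acceptable emails above `last` by repeated min-scans (no sort)."""
--     if k == 0:
--         return []
--     best = None
--     for e in pool:
--         if ("example.com" not in e and "wixpress.com" not in e
--                 and "noreply@" not in e and "no-reply@" not in e
--                 and (last is None or e > last)
--                 and (best is None or e < best)):
--             best = e
--     if best is None:
--         return []
--     return [best] + _pick(pool, best, k - 1)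
-- ===== Notes on version B (the rewrite author's own statement) =====
-- stated objective: alternative
-- what changed: B never sorts or dedups: it does up to five selection scans, each picking the smallest acceptable email strictly greater than the previously picked one, recursively building the result.
import Mathlib
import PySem

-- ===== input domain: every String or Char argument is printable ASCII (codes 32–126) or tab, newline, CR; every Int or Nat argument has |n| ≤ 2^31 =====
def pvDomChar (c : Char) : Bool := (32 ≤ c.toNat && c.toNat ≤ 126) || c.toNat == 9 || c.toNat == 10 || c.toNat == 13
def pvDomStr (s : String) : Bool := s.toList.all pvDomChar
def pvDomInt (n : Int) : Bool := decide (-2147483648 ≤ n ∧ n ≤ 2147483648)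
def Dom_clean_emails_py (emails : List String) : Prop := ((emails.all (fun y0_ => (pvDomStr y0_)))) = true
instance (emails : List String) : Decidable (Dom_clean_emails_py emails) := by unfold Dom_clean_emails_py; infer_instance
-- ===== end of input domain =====

-- B replaces A's sort + seen-set dedup loop by at most five selection scans, each picking the
-- smallest acceptable email strictly above the previously picked one (objective: alternative; same value).

-- shared straight transliterations of the Python subexpressions
def pvNorm (e : String) : String := PySem.Str.lower (PySem.Str.strip e)
def pvKeep (e : String) : Bool := !(e == "") && PySem.Str.isIn "@" e
def pvGood (e : String) : Bool :=
  !(PySem.Str.isIn "example.com" e) && !(PySem.Str.isIn "wixpress.com" e) &&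
  !(PySem.Str.isIn "noreply@" e) && !(PySem.Str.isIn "no-reply@" e)

-- ===== PORT A =====
def clean_emails_py (emails : List String) : List String :=
  let filtered :=
    (PySem.List.sorted ((emails.filter pvKeep).map pvNorm) (fun x => x) false).filter pvGood
  let st := filtered.foldl
    (fun (st : List String × PySem.Set String) email =>
      if PySem.Set.contains st.2 email then st
      else (st.1 ++ [email], PySem.Set.add st.2 email))
    ([], PySem.Set.empty)
  PySem.List.slice st.1 none (some 5)

-- ===== PORT B =====
-- `last is None or e > last`
def pvAbove (last : Option String) (e : String) : Bool :=
  match last with | none => true | some l => decide (l < e)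
-- `best is None or e < best`
def pvBetter (best : Option String) (e : String) : Bool :=
  match best with | none => true | some b => decide (e < b)

-- the inner `for e in pool` scan of _pick
def pvBest (pool : List String) (last : Option String) : Option String :=
  pool.foldl
    (fun best e => if pvGood e && pvAbove last e && pvBetter best e then some e else best)
    none

-- _pick(pool, last, k)
def pvPick (pool : List String) (last : Option String) : Nat → List String
  | 0 => []
  | Nat.succ k =>
    match pvBest pool last with
    | none => []
    | some b => b :: pvPick pool (some b) k

def clean_emails_py_alt (emails : List String) : List String :=
  pvPick ((emails.filter pvKeep).map pvNorm) none 5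

-- ===== PRECONDITION & SPEC =====
def Spec_clean_emails_py (emails : List String) (out : List String) : Prop := out = clean_emails_py_alt emails
instance (emails : List String) (out : List String) : Decidable (Spec_clean_emails_py emails out) := by unfold Spec_clean_emails_py; infer_instance

-- ===== CLAIM (what is proved, stated in full; the proofs are below) =====
def Claim_equal_clean_emails_py : Prop := ∀ (emails : List String), Dom_clean_emails_py emails → Spec_clean_emails_py emails (clean_emails_py emails)

-- ===== LEMMAS AND PROOFS =====

-- A's dedup loop keeps `deduped` and `seen` equal, so its result is the fold of Set.add.
lemma pv_loop_eq (l : List String) (s : PySem.Set String) :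
    l.foldl
      (fun (st : List String × PySem.Set String) email =>
        if PySem.Set.contains st.2 email then st
        else (st.1 ++ [email], PySem.Set.add st.2 email)) (s, s)
    = (l.foldl PySem.Set.add s, l.foldl PySem.Set.add s) := by
  induction l generalizing s with
  | nil => rfl
  | cons x t ih =>
    have hstep : (if PySem.Set.contains s x then ((s, s) : List String × PySem.Set String)
        else (s ++ [x], PySem.Set.add s x))
        = (PySem.Set.add s x, PySem.Set.add s x) := by
      by_cases h : PySem.Set.contains s x
      · have hx : x ∈ s := (PySem.Set.contains_iff s x).mp h
        rw [if_pos h, PySem.Set.add_of_mem hx]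
      · have hx : x ∉ s := fun hm => h ((PySem.Set.contains_iff s x).mpr hm)
        rw [if_neg h, PySem.Set.add_of_not_mem hx]
    simp only [List.foldl_cons]
    show List.foldl _
      (if PySem.Set.contains s x then ((s, s) : List String × PySem.Set String)
       else (s ++ [x], PySem.Set.add s x)) t = _
    rw [hstep, ih]

-- Set.ofList keeps a subsequence (first occurrences, in order)
lemma pv_ofList_sublist (xs : List String) : List.Sublist (PySem.Set.ofList xs) xs := by
  induction xs with
  | nil => exact List.Sublist.refl _
  | cons x t ih =>
    rw [PySem.Set.ofList_cons]
    exact List.Sublist.cons₂ x (List.filter_sublist.trans ih)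

-- A's value before the slice: dedup-after-sort-filter equals filter-after-sort-of-set
lemma pv_core (L : List String) :
    PySem.Set.ofList ((PySem.List.sorted L (fun x => x) false).filter pvGood)
    = (PySem.List.sorted (PySem.Set.ofList L) (fun x => x) false).filter pvGood := by
  have hsortedN : (PySem.List.sorted (PySem.Set.ofList L) (fun x => x) false).Nodup :=
    (PySem.List.sorted_perm (PySem.Set.ofList L) (fun x => x) false).symm.nodup
      (PySem.Set.nodup_ofList L)
  have hperm : List.Perm
      (PySem.Set.ofList ((PySem.List.sorted L (fun x => x) false).filter pvGood))
      ((PySem.List.sorted (PySem.Set.ofList L) (fun x => x) false).filter pvGood) := by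
    rw [List.perm_ext_iff_of_nodup (PySem.Set.nodup_ofList _) (hsortedN.filter _)]
    intro a
    simp only [PySem.Set.mem_ofList, List.mem_filter, PySem.List.mem_sorted]
  exact List.Perm.eq_of_pairwise
    (fun a b _ _ h1 h2 => le_antisymm h1 h2)
    (List.Pairwise.sublist (pv_ofList_sublist _)
      ((PySem.List.sorted_pairwise L (fun x => x)).filter _))
    ((PySem.List.sorted_pairwise (PySem.Set.ofList L) (fun x => x)).filter _)
    hperm

-- B's inner scan folds only over the elements passing its filter, as a running min
lemma pv_best_filter (pool : List String) (last : Option String) :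
    pvBest pool last
    = (pool.filter (fun e => pvGood e && pvAbove last e)).foldl
        (fun best e => if pvBetter best e then some e else best) none := by
  unfold pvBest
  generalize (none : Option String) = b
  induction pool generalizing b with
  | nil => rfl
  | cons x t ih =>
    simp only [List.foldl_cons, List.filter_cons]
    by_cases h : (pvGood x && pvAbove last x) = true
    · rw [if_pos h, h]
      simp only [Bool.true_and]
      exact ih _
    · rw [if_neg h]
      have hne : ¬ (pvGood x && pvAbove last x && pvBetter b x) = true := by
        simp only [Bool.and_eq_true] at h ⊢
        tauto
      rw [if_neg hne]
      exact ih _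

-- the running min fold is foldl min
lemma pv_min_fold (t : List String) (b : String) :
    t.foldl (fun best e => if pvBetter best e then some e else best) (some b)
    = some (t.foldl min b) := by
  induction t generalizing b with
  | nil => rfl
  | cons x s ih =>
    have : (if pvBetter (some b) x then some x else some b) = some (min b x) := by
      simp only [pvBetter]
      by_cases h : x < b
      · simp [h, min_eq_right (le_of_lt h)]
      · have hbx : min b x = b := min_eq_left (not_lt.mp h)
        simp [h, hbx]
    simp only [List.foldl_cons, this, ih]

-- pvBest is the head of the strictly sorted list of candidates
lemma pv_best_head (pool L : List String) (hL : L.Pairwise (· < ·))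
    (hmem : ∀ e, e ∈ L ↔ e ∈ pool ∧ pvGood e = true) (last : Option String) :
    pvBest pool last = (L.filter (pvAbove last)).head? := by
  have hmem' : ∀ e, e ∈ pool.filter (fun e => pvGood e && pvAbove last e)
      ↔ e ∈ L.filter (pvAbove last) := by
    intro e
    simp only [List.mem_filter, Bool.and_eq_true, hmem]
    tauto
  rw [pv_best_filter]
  cases hM : L.filter (pvAbove last) with
  | nil =>
    have : pool.filter (fun e => pvGood e && pvAbove last e) = [] := by
      rw [List.eq_nil_iff_forall_not_mem]
      intro x hx; rw [hmem', hM] at hx; exact (List.not_mem_nil).elim hx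
    rw [this]; rfl
  | cons m rest =>
    have hmmem : m ∈ pool.filter (fun e => pvGood e && pvAbove last e) := by
      rw [hmem', hM]; exact List.mem_cons_self
    obtain ⟨a, t, hat⟩ : ∃ a t, pool.filter (fun e => pvGood e && pvAbove last e) = a :: t := by
      cases h' : pool.filter (fun e => pvGood e && pvAbove last e) with
      | nil => rw [h'] at hmmem; exact (List.not_mem_nil).elim hmmem
      | cons a t => exact ⟨a, t, rfl⟩
    rw [hat]
    rw [show List.foldl (fun best e => if pvBetter best e = true then some e else best)
          none (a :: t)
        = List.foldl (fun best e => if pvBetter best e = true then some e else best)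
          (some a) t from rfl, pv_min_fold]
    have hv : t.foldl min a ∈ L.filter (pvAbove last) := by
      rw [← hmem', hat]
      rcases PySem.List.foldl_min_mem t a with h | h
      · rw [h]; exact List.mem_cons_self
      · exact List.mem_cons_of_mem _ h
    have hvle : ∀ y ∈ a :: t, t.foldl min a ≤ y := by
      intro y hy
      rcases List.mem_cons.mp hy with rfl | hy
      · exact (PySem.List.foldl_min_le t y).1
      · exact (PySem.List.foldl_min_le t a).2 y hy
    have hMp : (L.filter (pvAbove last)).Pairwise (· < ·) := hL.filter _
    rw [hM] at hv
    rcases List.mem_cons.mp hv with hvm | hvrest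
    · simp [hvm]
    · -- impossible: the min is ≤ m but m < every element of rest
      have h1 : m < t.foldl min a := by
        rw [hM] at hMp
        exact (List.pairwise_cons.mp hMp).1 _ hvrest
      have h2 : t.foldl min a ≤ m := by
        apply hvle; rw [← hat, hmem', hM]; exact List.mem_cons_self
      exact absurd h1 (not_lt.mpr h2)

-- the selection recursion takes successive heads: it returns take k of the candidate list
lemma pv_pick_take (pool L : List String) (hL : L.Pairwise (· < ·))
    (hmem : ∀ e, e ∈ L ↔ e ∈ pool ∧ pvGood e = true) :
    ∀ (k : Nat) (last : Option String),
      pvPick pool last k = (L.filter (pvAbove last)).take k := by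
  intro k
  induction k with
  | zero => intro last; simp [pvPick]
  | succ k ih =>
    intro last
    rw [pvPick, pv_best_head pool L hL hmem last]
    cases hM : L.filter (pvAbove last) with
    | nil => simp
    | cons m rest =>
      simp only [List.head?_cons, List.take_succ_cons]
      have hMp : (m :: rest).Pairwise (· < ·) := hM ▸ hL.filter _
      have hmL : pvAbove last m = true := by
        have : m ∈ L.filter (pvAbove last) := hM ▸ List.mem_cons_self
        exact (List.mem_filter.mp this).2
      have hrest : L.filter (pvAbove (some m)) = rest := by
        have h1 : L.filter (pvAbove (some m))
            = L.filter (fun e => pvAbove (some m) e && pvAbove last e) := by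
          apply List.filter_congr
          intro x hx
          cases last with
          | none => simp [pvAbove]
          | some l =>
            simp only [pvAbove] at hmL ⊢
            by_cases hmx : m < x
            · have hlx : l < x := lt_trans (of_decide_eq_true hmL) hmx
              simp [hmx, hlx]
            · simp [hmx]
        rw [h1, ← List.filter_filter, hM, List.filter_cons]
        have : pvAbove (some m) m = false := by simp [pvAbove]
        rw [this]
        simp only [Bool.false_eq_true, if_false]
        exact List.filter_eq_self.mpr (fun x hx => by
          simpa [pvAbove] using (List.pairwise_cons.mp hMp).1 x hx)
      rw [ih (some m), hrest]

-- ===== VERDICT (by name: the statement is the Claim_ definition above) =====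
theorem clean_emails_py_spec : Claim_equal_clean_emails_py := by
  intro emails _
  unfold Spec_clean_emails_py clean_emails_py clean_emails_py_alt
  set pool := (emails.filter pvKeep).map pvNorm with hpool
  show PySem.List.slice
      (((PySem.List.sorted pool (fun x => x) false).filter pvGood).foldl
        (fun (st : List String × PySem.Set String) email =>
          if PySem.Set.contains st.2 email then st
          else (st.1 ++ [email], PySem.Set.add st.2 email))
        (PySem.Set.empty, PySem.Set.empty)).1 none (some 5) = _
  rw [pv_loop_eq]
  show PySem.List.slice
      (PySem.Set.ofList ((PySem.List.sorted pool (fun x => x) false).filter pvGood))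
      none (some 5) = _
  rw [pv_core]
  set L := (PySem.List.sorted (PySem.Set.ofList pool) (fun x => x) false).filter pvGood with hLdef
  have hL : L.Pairwise (· < ·) :=
    (PySem.List.sorted_ofList_pairwise_lt pool).filter _
  have hmem : ∀ e, e ∈ L ↔ e ∈ pool ∧ pvGood e = true := by
    intro e
    simp [hLdef, List.mem_filter, PySem.List.mem_sorted, PySem.Set.mem_ofList]
  rw [pv_pick_take pool L hL hmem 5 none]
  have : L.filter (pvAbove none) = L := List.filter_eq_self.mpr (fun x _ => rfl)
  rw [this, PySem.List.slice_to (xs := L) (b := 5) (by norm_num)]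
  rfl
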